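-- pv_equiv track=rewrite | github.com/dohyun93/python_playground | 2019 카카오 개발자 겨울 인턴십/불량 사용자_8월 15일.py | satisfy
-- ===== SOURCE A (Python) =====
-- def satisfy(users, banned_id):
--     for i in range(len(banned_id)):
--         if len(users[i]) != len(banned_id[i]):
--             return False
--
--         for j in range(len(banned_id[i])):
--             if banned_id[i][j] == '*':
--                 continue
--             if banned_id[i][j] != users[i][j]:
--                 return False
--     return True
-- ===== SOURCE B (Python) =====
-- def satisfy(users, banned_id):
--     # Mask-then-compare: overwrite each user character that sits under a '*' of the
--     # pattern with '*', then the whole check is plain string equality with the pattern.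
--     def mask(u, b):
--         return ''.join('*' if j < len(b) and b[j] == '*' else c for j, c in enumerate(u))
--     return all(mask(u, b) == b for u, b in zip(users, banned_id))
-- ===== Notes on version B (the rewrite author's own statement) =====
-- stated objective: alternative
-- what changed: Instead of comparing characters one by one with early returns, B canonicalizes each user string by overwriting the positions where the pattern has '*' with '*' and then tests whole-string equality against the pattern (mask-then-compare); the outer index loop becomes one all() over zip.
import Mathlib
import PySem

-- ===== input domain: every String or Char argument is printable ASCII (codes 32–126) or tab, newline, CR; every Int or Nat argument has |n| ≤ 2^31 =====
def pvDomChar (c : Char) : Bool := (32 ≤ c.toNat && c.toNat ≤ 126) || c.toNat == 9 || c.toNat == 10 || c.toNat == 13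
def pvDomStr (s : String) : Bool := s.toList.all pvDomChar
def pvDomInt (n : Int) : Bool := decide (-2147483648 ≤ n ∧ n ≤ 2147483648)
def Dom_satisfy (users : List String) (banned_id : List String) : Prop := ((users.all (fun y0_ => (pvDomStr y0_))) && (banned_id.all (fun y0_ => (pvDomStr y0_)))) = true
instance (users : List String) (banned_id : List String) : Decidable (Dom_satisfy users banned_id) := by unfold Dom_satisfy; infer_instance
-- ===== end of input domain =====

-- B replaces A's per-character comparison loop with mask-then-compare: the user string is
-- canonicalized by the pattern's '*' positions and then tested for whole-string equality
-- (objective: alternative; same asymptotic cost).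

-- ===== PORT A =====
-- inner loop: for j in range(len(banned_id[i])): …
def satisfyInner (u b : List Char) (j : Nat) : Bool :=
  if h : j < b.length then
    if b[j] == '*' then satisfyInner u b (j + 1)
    else
      match PySem.List.pyGet? u (j : Int) with
      | some uc => if b[j] != uc then false else satisfyInner u b (j + 1)
      | none => false          -- IndexError (unreachable: lengths checked equal before the inner loop)
  else true
termination_by b.length - j

-- outer loop: for i in range(len(banned_id)): …
def satisfyOuter (users banned_id : List String) (i : Nat) : Bool :=
  if _h : i < banned_id.length then
    match PySem.List.pyGet? users (i : Int), PySem.List.pyGet? banned_id (i : Int) with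
    | some u, some b =>
      if u.toList.length != b.toList.length then false
      else if satisfyInner u.toList b.toList 0 then satisfyOuter users banned_id (i + 1)
      else false
    | _, _ => false            -- IndexError on users[i] (outside Pre_)
  else true
termination_by banned_id.length - i

def satisfy (users : List String) (banned_id : List String) : Bool :=
  satisfyOuter users banned_id 0

-- ===== PORT B =====
-- mask(u, b): ''.join('*' if j < len(b) and b[j] == '*' else c for j, c in enumerate(u))
def maskAlt (u b : List Char) : List Char :=
  (PySem.List.enumerate u).map (fun p =>
    if p.1 < (b.length : Int) ∧ PySem.List.pyGet? b p.1 = some '*' then '*' else p.2)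

-- all(mask(u, b) == b for u, b in zip(users, banned_id)); string equality is ported as
-- equality of the character lists (exact: String equality coincides with toList equality).
def satisfy_alt (users : List String) (banned_id : List String) : Bool :=
  (users.zip banned_id).all (fun p => maskAlt p.1.toList p.2.toList == p.2.toList)

-- ===== PRECONDITION & SPEC =====
-- helper shared by Pre_ only (not by either port): pattern b fully matches user u
def pvPairMatch (u b : String) : Bool :=
  u.toList.length == b.toList.length &&
  (u.toList.zip b.toList).all (fun q => q.2 == '*' || q.2 == q.1)

-- Pre_ excludes exactly the inputs where A raises IndexError: users shorter than banned_id
-- while every available (user, pattern) pair matches, so the loop reaches users[len(users)].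
def Pre_satisfy (users : List String) (banned_id : List String) : Prop :=
  users.length < banned_id.length →
    (users.zip banned_id).all (fun p => pvPairMatch p.1 p.2) = false
instance (users : List String) (banned_id : List String) : Decidable (Pre_satisfy users banned_id) := by
  unfold Pre_satisfy; infer_instance

def pvWitness_satisfy : List String × List String := (["ab"], ["a*"])

def Spec_satisfy (users : List String) (banned_id : List String) (out : Bool) : Prop := out = satisfy_alt users banned_id
instance (users : List String) (banned_id : List String) (out : Bool) : Decidable (Spec_satisfy users banned_id out) := by unfold Spec_satisfy; infer_instance

-- ===== CLAIM (what is proved, stated in full; the proofs are below) =====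
def Claim_equal_satisfy : Prop := ∀ (users : List String) (banned_id : List String), Dom_satisfy users banned_id → Pre_satisfy users banned_id → Spec_satisfy users banned_id (satisfy users banned_id)

-- ===== LEMMAS AND PROOFS =====

lemma mask_length (u b : List Char) : (maskAlt u b).length = u.length := by
  simp [maskAlt, PySem.List.length_enumerate]

lemma mask_getElem (u b : List Char) (k : Nat) (hk : k < u.length) :
    (maskAlt u b)[k]'(by simpa [mask_length] using hk) =
      if h : k < b.length then (if b[k] = '*' then '*' else u[k]) else u[k] := by
  simp only [maskAlt, List.getElem_map, PySem.List.getElem_enumerate]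
  by_cases h : k < b.length
  · have hg : PySem.List.pyGet? b ((0 : Int) + k) = some b[k] := by
      simp [PySem.List.pyGet?_natCast, List.getElem?_eq_getElem h]
    by_cases hs : b[k] = '*'
    · rw [dif_pos h, if_pos ⟨by omega, by rw [hg, hs]⟩, if_pos hs]
    · rw [dif_pos h, if_neg (by rintro ⟨-, he⟩; rw [hg] at he; exact hs (by simpa using he)),
        if_neg hs]
  · have hg : PySem.List.pyGet? b ((0 : Int) + k) = none := by
      simp [PySem.List.pyGet?_natCast]; omega
    rw [dif_neg h, if_neg (by rintro ⟨-, he⟩; rw [hg] at he; cases he)]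

lemma mem_zip_of_getElem (u b : List Char) (k : Nat) (h1 : k < u.length) (h2 : k < b.length) :
    (u[k], b[k]) ∈ u.zip b := by
  rw [List.mem_iff_getElem]
  exact ⟨k, by simp [List.length_zip]; omega, by simp⟩

lemma mask_eq_iff (u b : List Char) :
    maskAlt u b = b ↔
      (u.length = b.length ∧
        (u.zip b).all (fun q => q.2 == '*' || q.2 == q.1) = true) := by
  constructor
  · intro h
    have hlen : u.length = b.length := by
      have := congrArg List.length h
      simpa [mask_length] using this
    refine ⟨hlen, ?_⟩
    rw [List.all_eq_true]
    intro q hq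
    rw [List.mem_iff_getElem] at hq
    obtain ⟨k, hk, hq⟩ := hq
    have hku : k < u.length := by
      simpa [List.length_zip] using (lt_of_lt_of_le hk (by simp [List.length_zip]))
    have hkb : k < b.length := by omega
    rw [List.getElem_zip] at hq
    have hm : (maskAlt u b)[k]'(by simpa [mask_length] using hku) = b[k] :=
      List.getElem_of_eq h _
    rw [mask_getElem u b k hku, dif_pos hkb] at hm
    by_cases hs : b[k] = '*'
    · simp [← hq, hs]
    · rw [if_neg hs] at hm
      simp [← hq, hm]
  · rintro ⟨hlen, hall⟩
    apply List.ext_getElem (by simpa [mask_length] using hlen)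
    intro k hk1 hk2
    have hku : k < u.length := by simpa [mask_length] using hk1
    rw [mask_getElem u b k hku, dif_pos hk2]
    by_cases hs : b[k] = '*'
    · simp [hs]
    · rw [if_neg hs]
      rw [List.all_eq_true] at hall
      have := hall _ (mem_zip_of_getElem u b k hku hk2)
      simp only [Bool.or_eq_true, beq_iff_eq] at this
      rcases this with h | h
      · exact absurd h hs
      · exact h.symm

lemma pair_bool (u b : String) :
    (maskAlt u.toList b.toList == b.toList) =
      (u.toList.length == b.toList.length &&
        (u.toList.zip b.toList).all (fun q => q.2 == '*' || q.2 == q.1)) := by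
  rw [Bool.eq_iff_iff]
  simp only [beq_iff_eq, Bool.and_eq_true, beq_iff_eq]
  constructor
  · intro h; exact ⟨(mask_eq_iff _ _).mp h |>.1, (mask_eq_iff _ _).mp h |>.2⟩
  · intro h; exact (mask_eq_iff _ _).mpr h

lemma inner_eq (u b : List Char) (hlen : u.length = b.length) :
    ∀ j, satisfyInner u b j =
      ((u.zip b).drop j).all (fun q => q.2 == '*' || q.2 == q.1) := by
  intro j
  have hz : (u.zip b).length = b.length := by
    simp [List.length_zip, hlen]
  induction hn : b.length - j using Nat.strong_induction_on generalizing j with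
  | _ n ih =>
    rw [satisfyInner]
    by_cases h : j < b.length
    · have hju : j < u.length := by omega
      have hjz : j < (u.zip b).length := by omega
      rw [dif_pos h]
      rw [List.drop_eq_getElem_cons hjz, List.getElem_zip]
      have hget : PySem.List.pyGet? u (j : Int) = some u[j] := by
        simp [PySem.List.pyGet?_natCast, List.getElem?_eq_getElem hju]
      have hrec : satisfyInner u b (j + 1) =
          ((u.zip b).drop (j + 1)).all (fun q => q.2 == '*' || q.2 == q.1) := by
        exact ih (b.length - (j + 1)) (by omega) (j + 1) rfl
      by_cases hs : b[j] = '*'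
      · simp [hs, hrec]
      · simp only [List.all_cons]
        rw [if_neg (by simp [hs]), hget]
        by_cases he : b[j] = u[j]
        · simp [he, hrec]
        · simp [he, hs]
    · rw [dif_neg h]
      have : (u.zip b).drop j = [] := List.drop_eq_nil_of_le (by omega)
      simp [this]

lemma outer_eq (users banned_id : List String) :
    ∀ i, (users.length < banned_id.length →
        ((users.zip banned_id).drop i).all (fun p =>
          p.1.toList.length == p.2.toList.length &&
          (p.1.toList.zip p.2.toList).all (fun q => q.2 == '*' || q.2 == q.1)) = false) →
      satisfyOuter users banned_id i =
        ((users.zip banned_id).drop i).all (fun p =>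
          p.1.toList.length == p.2.toList.length &&
          (p.1.toList.zip p.2.toList).all (fun q => q.2 == '*' || q.2 == q.1)) := by
  intro i
  induction hn : banned_id.length - i using Nat.strong_induction_on generalizing i with
  | _ n ih =>
    intro hpre
    rw [satisfyOuter]
    by_cases h : i < banned_id.length
    · rw [dif_pos h]
      by_cases hu : i < users.length
      · have hiz : i < (users.zip banned_id).length := by
          simp [List.length_zip]; omega
        have hgu : PySem.List.pyGet? users (i : Int) = some users[i] := by
          simp [PySem.List.pyGet?_natCast, List.getElem?_eq_getElem hu]
        have hgb : PySem.List.pyGet? banned_id (i : Int) = some banned_id[i] := by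
          simp [PySem.List.pyGet?_natCast, List.getElem?_eq_getElem h]
        rw [hgu, hgb]
        dsimp only
        rw [List.drop_eq_getElem_cons hiz, List.getElem_zip, List.all_cons]
        by_cases hlen : users[i].toList.length = banned_id[i].toList.length
        · rw [if_neg (by simp [hlen])]
          rw [inner_eq users[i].toList banned_id[i].toList hlen 0]
          simp only [List.drop_zero]
          by_cases hm :
              (users[i].toList.zip banned_id[i].toList).all
                (fun q => q.2 == '*' || q.2 == q.1) = true
          · rw [if_pos hm]
            have htail : users.length < banned_id.length →
                ((users.zip banned_id).drop (i + 1)).all (fun p =>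
                  p.1.toList.length == p.2.toList.length &&
                  (p.1.toList.zip p.2.toList).all (fun q => q.2 == '*' || q.2 == q.1)) = false := by
              intro hlt
              have := hpre hlt
              rw [List.drop_eq_getElem_cons hiz, List.getElem_zip, List.all_cons] at this
              simpa [hlen, hm] using this
            rw [ih (banned_id.length - (i + 1)) (by omega) (i + 1) rfl htail]
            simp [hlen, hm]
          · rw [if_neg hm]
            simp [hlen, hm]
        · rw [if_pos (by simp only [bne_iff_ne, ne_eq]; exact hlen)]
          rw [beq_eq_false_iff_ne.mpr hlen]
          simp
      · exfalso
        have hlt : users.length < banned_id.length := by omega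
        have hnil : (users.zip banned_id).drop i = [] :=
          List.drop_eq_nil_of_le (by simp [List.length_zip]; omega)
        have := hpre hlt
        rw [hnil] at this
        simp at this
    · rw [dif_neg h]
      have : (users.zip banned_id).drop i = [] :=
        List.drop_eq_nil_of_le (by simp [List.length_zip]; omega)
      simp [this]

-- ===== VERDICT (by name: the statement is the Claim_ definition above) =====
theorem satisfy_spec : Claim_equal_satisfy := by
  intro users banned_id _ hpre
  unfold Spec_satisfy satisfy satisfy_alt
  simp only [pair_bool]
  have h := outer_eq users banned_id 0 (by
    intro hlt
    have := hpre hlt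
    simpa [pvPairMatch] using this)
  simpa using h
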